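-- pv_equiv track=rewrite | github.com/romeorizzi/temi_prog_public | 2018.12.05.provetta/all-CMS-submissions-2018-12-05/2018-12-05.12:21:06.859097.VR429663.rank_unrank_ABstrings.py | ABstring_of_len_and_rank
-- ===== SOURCE A (Python) =====
-- def map_num_to_char(n):
--     return ["A","B"][n]
--
-- def ABstring_of_len_and_rank(length, r):
--     s = ""
--     while r>0:
--         s+=map_num_to_char(r%2)
--         r//=2
--     while len(s) < length:
--         s+=map_num_to_char(0)
--     return s[::-1]
-- ===== SOURCE B (Python) =====
-- def ABstring_of_len_and_rank(length, r):
--     bits = r if r > 0 else 0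
--     width = max(length, bits.bit_length())
--     return ''.join('B' if (bits >> i) & 1 else 'A' for i in range(width - 1, -1, -1))
-- ===== Notes on version B (the rewrite author's own statement) =====
-- stated objective: simpler
-- what changed: B replaces A's three phases (LSB-first remainder/division loop building the string backwards by repeated concatenation, a separate padding loop, and a final reversal) by a single MSB-first pass that emits each character directly in output order via shift-and-mask bit tests over width = max(length, bit_length).
import Mathlib
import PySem

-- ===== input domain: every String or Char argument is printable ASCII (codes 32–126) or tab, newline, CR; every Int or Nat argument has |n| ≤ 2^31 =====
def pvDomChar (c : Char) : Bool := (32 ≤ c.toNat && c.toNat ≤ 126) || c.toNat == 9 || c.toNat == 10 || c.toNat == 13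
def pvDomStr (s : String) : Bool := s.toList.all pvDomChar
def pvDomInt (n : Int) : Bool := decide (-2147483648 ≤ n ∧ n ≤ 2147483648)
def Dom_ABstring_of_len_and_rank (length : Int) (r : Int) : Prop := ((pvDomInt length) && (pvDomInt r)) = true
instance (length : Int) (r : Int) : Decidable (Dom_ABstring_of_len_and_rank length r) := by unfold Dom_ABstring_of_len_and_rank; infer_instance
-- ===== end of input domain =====

-- B builds the string directly MSB-first via bit-shift tests over width = max(length, bit_length(max(r,0))),
-- replacing A's LSB-first remainder/division loop, separate padding loop and final reversal (objective: simpler).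

-- ===== PORT A =====
-- ["A","B"][n]; n is always 0 or 1 at the call sites (Python would raise IndexError otherwise)
def map_num_to_char (n : Int) : String :=
  (PySem.List.pyGet? ["A", "B"] n).getD ""

-- 'while r > 0: s += map_num_to_char(r % 2); r //= 2'  (s carried as List Char)
def pyABdigits (r : Int) (s : List Char) : List Char :=
  if 0 < r then
    pyABdigits (PySem.Int.floordiv r 2) (s ++ (map_num_to_char (PySem.Int.mod r 2)).toList)
  else s
termination_by r.toNat
decreasing_by
  rename_i h
  rw [PySem.Int.floordiv_eq_ediv_of_pos (by omega)]
  omega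

-- 'while len(s) < length: s += map_num_to_char(0)'
def pyABpad (length : Int) (s : List Char) : List Char :=
  if (s.length : Int) < length then
    pyABpad length (s ++ (map_num_to_char 0).toList)
  else s
termination_by (length - s.length).toNat
decreasing_by
  rename_i h
  have : (map_num_to_char 0).toList = ['A'] := rfl
  simp [this]
  omega

-- 'return s[::-1]'
def ABstring_of_len_and_rank (length : Int) (r : Int) : String :=
  String.ofList ((PySem.List.slice? (pyABpad length (pyABdigits r [])) none none (-1)).getD [])

-- ===== PORT B =====
def ABstring_of_len_and_rank_alt (length : Int) (r : Int) : String :=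
  let bits : Int := if 0 < r then r else 0
  let width : Int := max length (PySem.Int.bitLength bits : Int)
  String.ofList ((PySem.List.pyRange (width - 1) (-1) (-1)).map
    (fun i => if PySem.Int.band (bits >>> i.toNat) 1 = 1 then 'B' else 'A'))

-- ===== PRECONDITION & SPEC =====
def Spec_ABstring_of_len_and_rank (length : Int) (r : Int) (out : String) : Prop := out = ABstring_of_len_and_rank_alt length r
instance (length : Int) (r : Int) (out : String) : Decidable (Spec_ABstring_of_len_and_rank length r out) := by unfold Spec_ABstring_of_len_and_rank; infer_instance

-- ===== CLAIM (what is proved, stated in full; the proofs are below) =====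
def Claim_equal_ABstring_of_len_and_rank : Prop := ∀ (length : Int) (r : Int), Dom_ABstring_of_len_and_rank length r → Spec_ABstring_of_len_and_rank length r (ABstring_of_len_and_rank length r)

-- ===== LEMMAS AND PROOFS =====

-- the character A's loop emits for bit i, and B's shift-test emits at offset i: 'B' iff bit i of n is set
def pvBitChar (n : Nat) (i : Nat) : Char := if n.testBit i then 'B' else 'A'

-- A's first loop appends exactly the bit characters of n, LSB first
theorem pvDigits_eq (n : Nat) : ∀ s : List Char,
    pyABdigits (n : Int) s = s ++ (List.range (PySem.Int.bitLength (n : Int))).map (pvBitChar n) := by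
  induction n using Nat.strong_induction_on with
  | _ n ih =>
    intro s
    rcases Nat.eq_zero_or_pos n with h0 | hpos
    · subst h0
      rw [pyABdigits]
      simp [PySem.Int.bitLength_zero]
    · rw [pyABdigits]
      have hcast : (0 : Int) < (n : Int) := by exact_mod_cast hpos
      rw [if_pos hcast]
      have hm : PySem.Int.mod (n : Int) 2 = ((n % 2 : Nat) : Int) := by
        exact_mod_cast PySem.Int.mod_natCast n 2
      have hd : PySem.Int.floordiv (n : Int) 2 = ((n / 2 : Nat) : Int) := by
        exact_mod_cast PySem.Int.floordiv_natCast n 2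
      rw [hm, hd]
      rw [ih (n / 2) (Nat.div_lt_self hpos (by omega))]
      rw [PySem.Int.bitLength_natCast hpos]
      rw [List.range_succ_eq_map]
      have hchar : (map_num_to_char ((n % 2 : Nat) : Int)).toList = [pvBitChar n 0] := by
        rcases Nat.mod_two_eq_zero_or_one n with h | h <;>
          simp [map_num_to_char, pvBitChar, Nat.testBit_zero, h]
      have hbit : ∀ i, pvBitChar (n / 2) i = pvBitChar n (i + 1) := by
        intro i; simp [pvBitChar, Nat.testBit_add_one]
      simp only [List.map_cons, List.map_map]
      rw [hchar]
      have : (List.range (PySem.Int.bitLength ((n / 2 : Nat) : Int))).map (pvBitChar (n / 2))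
          = (List.range (PySem.Int.bitLength ((n / 2 : Nat) : Int))).map (pvBitChar n ∘ Nat.succ) := by
        apply List.map_congr_left; intro i _
        simpa [Function.comp, Nat.succ_eq_add_one] using hbit i
      rw [this]
      simp [pvBitChar, Nat.testBit_zero]

theorem pvDigits_nonpos (r : Int) (h : r ≤ 0) (s : List Char) : pyABdigits r s = s := by
  rw [pyABdigits]; simp [not_lt.mpr h]

-- A's second loop is padding with 'A' up to length
theorem pvPad_eq (length : Int) : ∀ s : List Char,
    pyABpad length s = s ++ List.replicate ((length - s.length).toNat) 'A' := by
  intro s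
  induction s using pyABpad.induct (length := length) with
  | case1 s h ih =>
    have hA : (map_num_to_char 0).toList = ['A'] := rfl
    rw [pyABpad, if_pos h, ih, hA, List.append_assoc]
    congr 1
    rw [List.singleton_append, ← List.replicate_succ]
    congr 1
    simp
    omega
  | case2 s h =>
    rw [pyABpad, if_neg h]
    have : (length - s.length).toNat = 0 := by omega
    simp [this]

-- B's shift-and-mask test reads bit k of n
theorem pvTestBit_char (n k : Nat) :
    (if PySem.Int.band ((n : Int) >>> (k : Int)) 1 = 1 then 'B' else 'A') = pvBitChar n k := by
  have h1 : (n : Int) >>> (k : Int) = ((n >>> k : Nat) : Int) := by simp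
  have h2 : PySem.Int.band ((n >>> k : Nat) : Int) 1 = (((n >>> k) &&& 1 : Nat) : Int) := by
    exact_mod_cast PySem.Int.band_natCast (n >>> k) 1
  have h3 : ((((n >>> k) &&& 1 : Nat) : Int) = 1) ↔ ((n >>> k) &&& 1 = 1) := by exact_mod_cast Iff.rfl
  rw [h1, h2]
  simp only [pvBitChar]
  rw [show n.testBit k = (1 &&& (n >>> k) != 0) from rfl, Nat.and_comm 1, Nat.and_one_is_mod]
  rcases Nat.mod_two_eq_zero_or_one (n >>> k) with h | h <;> simp [h]

-- B's countdown loop is the reverse of the MSB-first bit map over [0, width)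
theorem pvAlt_list (n : Nat) (width : Int) :
    (PySem.List.pyRange (width - 1) (-1) (-1)).map
      (fun i => if PySem.Int.band ((n : Int) >>> i.toNat) 1 = 1 then 'B' else 'A')
    = ((List.range width.toNat).map (pvBitChar n)).reverse := by
  rw [PySem.List.pyRange_neg_one_eq_reverse]
  rw [show (-1 : Int) + 1 = 0 by ring, show width - 1 + 1 = width by ring]
  rw [PySem.List.pyRange_one, List.map_reverse, List.map_map]
  rw [show width - 0 = width by ring]
  congr 1
  apply List.map_congr_left
  intro k hk
  simp only [Function.comp]
  rw [show ((0 : Int) + (k : Int)).toNat = k by omega]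
  exact pvTestBit_char n k

-- bit characters up to bit_length followed by the 'A'-padding ARE the bit characters up to width
theorem pvFull_range (n : Nat) (length : Int) :
    (List.range (PySem.Int.bitLength (n : Int))).map (pvBitChar n)
      ++ List.replicate ((length - (PySem.Int.bitLength (n : Int) : Int)).toNat) 'A'
    = (List.range (max length (PySem.Int.bitLength (n : Int) : Int)).toNat).map (pvBitChar n) := by
  set L := PySem.Int.bitLength (n : Int) with hL
  set pad := (length - (L : Int)).toNat with hpad
  have hW : (max length (L : Int)).toNat = L + pad := by omega
  rw [hW, List.range_add, List.map_append]
  congr 1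
  rw [List.map_map]
  have hconst : ∀ k ∈ List.range pad, (pvBitChar n ∘ (L + ·)) k = 'A' := by
    intro k _
    simp only [Function.comp, pvBitChar]
    have hlt : n < 2 ^ (L + k) := by
      calc n = ((n : Int)).natAbs := by simp
        _ < 2 ^ L := PySem.Int.lt_two_pow_bitLength (n : Int)
        _ ≤ 2 ^ (L + k) := Nat.pow_le_pow_right (by omega) (by omega)
    simp [Nat.testBit_lt_two_pow hlt]
  rw [List.map_congr_left hconst]
  simp [List.map_const']

theorem pvMain (length r : Int) :
    ABstring_of_len_and_rank length r = ABstring_of_len_and_rank_alt length r := by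
  unfold ABstring_of_len_and_rank ABstring_of_len_and_rank_alt
  rw [PySem.List.slice?_none_none_neg_one]
  simp only [Option.getD_some]
  by_cases hr : 0 < r
  · have hn : ((r.toNat : Nat) : Int) = r := by omega
    rw [if_pos hr, ← hn, pvDigits_eq r.toNat [], List.nil_append, pvPad_eq]
    rw [pvAlt_list r.toNat]
    congr 1
    rw [← pvFull_range r.toNat length]
    congr 2
    simp
  · rw [if_neg hr, pvDigits_nonpos r (by omega), pvPad_eq]
    rw [show ((0:Int)) = ((0:Nat):Int) by simp, pvAlt_list 0]
    simp only [List.nil_append, List.length_nil, Nat.cast_zero, Int.sub_zero]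
    have h1 : (List.range (max length ((PySem.Int.bitLength (0:Int) : Nat) : Int)).toNat).map (pvBitChar 0)
        = List.replicate length.toNat 'A' := by
      have hmax : (max length ((PySem.Int.bitLength (0:Int) : Nat) : Int)).toNat = length.toNat := by
        rw [show PySem.Int.bitLength (0:Int) = 0 from by decide]; omega
      rw [hmax]
      have : ∀ k ∈ List.range length.toNat, pvBitChar 0 k = 'A' := by
        intro k _; simp [pvBitChar, Nat.zero_testBit]
      rw [List.map_congr_left this]
      simp [List.map_const']
    rw [h1]

-- ===== VERDICT (by name: the statement is the Claim_ definition above) =====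
theorem ABstring_of_len_and_rank_spec : Claim_equal_ABstring_of_len_and_rank := by
  intro length r _
  unfold Spec_ABstring_of_len_and_rank
  exact pvMain length r
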